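-- pv_equiv track=rewrite | github.com/paarthgupta/TIPR | python/main_copy.py | get_majority
-- ===== SOURCE A (Python) =====
-- import operator
--
-- def get_majority(neighbors):
--     majority = {}
--     for x in range(len(neighbors)):
--         if (neighbors[x] not in majority):
--             majority[neighbors[x]] = 1
--         else:
--             majority[neighbors[x]] += 1
--     return (max(majority.items(), key=operator.itemgetter(1))[0] )
-- ===== SOURCE B (Python) =====
-- def get_majority(neighbors):
--     best = neighbors[0]
--     best_count = neighbors.count(best)
--     for x in neighbors[1:]:
--         c = neighbors.count(x)
--         if best_count < c:
--             best = x
--             best_count = c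
--     return best
-- ===== Notes on version B (the rewrite author's own statement) =====
-- stated objective: alternative
-- what changed: B drops the frequency dict entirely: it scans the list once keeping a running argmax, computing each element's frequency with list.count (a quadratic nested scan) and updating only on a strictly larger count, which reproduces the first-occurrence tie-break without any hash map.
import Mathlib
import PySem

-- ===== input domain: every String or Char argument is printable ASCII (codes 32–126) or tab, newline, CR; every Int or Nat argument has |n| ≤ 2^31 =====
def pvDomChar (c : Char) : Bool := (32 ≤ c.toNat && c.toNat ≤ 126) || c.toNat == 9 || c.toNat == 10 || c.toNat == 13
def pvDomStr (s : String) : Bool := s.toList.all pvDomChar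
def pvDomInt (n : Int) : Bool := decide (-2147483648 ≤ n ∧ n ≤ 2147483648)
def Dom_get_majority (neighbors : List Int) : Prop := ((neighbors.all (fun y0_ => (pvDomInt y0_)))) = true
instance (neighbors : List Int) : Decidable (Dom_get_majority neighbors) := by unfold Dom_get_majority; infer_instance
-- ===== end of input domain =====

-- B drops the frequency dict: a single running-argmax scan that counts each element's
-- frequency with list.count and updates only on a strictly larger count.


-- ===== PORT A =====
def get_majority (neighbors : List Int) : Int :=
  let majority := neighbors.foldl (fun d x =>
    if d.contains x = false then d.insert x 1 else d.modify x 0 (· + 1))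
    (PySem.Dict.empty : PySem.Dict Int Int)
  match PySem.List.max? majority.items (fun p => p.2) with
  | some p => p.1
  | none => 0   -- Python's max raises ValueError here (empty input); excluded by Pre_

-- ===== PORT B =====
def get_majority_alt (neighbors : List Int) : Int :=
  match neighbors with
  | [] => 0   -- Python's neighbors[0] raises IndexError here; excluded by Pre_
  | b0 :: rest =>
    ((PySem.List.slice (b0 :: rest) (some 1) none).foldl
      (fun acc x =>
        let c := ((b0 :: rest).count x : Int)
        if acc.2 < c then (x, c) else acc)
      (b0, ((b0 :: rest).count b0 : Int))).1

-- ===== PRECONDITION & SPEC =====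
-- Pre_ excludes only the empty list, on which A raises ValueError (max of an empty sequence).
def Pre_get_majority (neighbors : List Int) : Prop := neighbors ≠ []
instance (neighbors : List Int) : Decidable (Pre_get_majority neighbors) := by unfold Pre_get_majority; infer_instance
def pvWitness_get_majority : List Int := [1, 2, 1]

def Spec_get_majority (neighbors : List Int) (out : Int) : Prop := out = get_majority_alt neighbors
instance (neighbors : List Int) (out : Int) : Decidable (Spec_get_majority neighbors out) := by unfold Spec_get_majority; infer_instance

-- ===== CLAIM (what is proved, stated in full; the proofs are below) =====
def Claim_equal_get_majority : Prop := ∀ (neighbors : List Int), Dom_get_majority neighbors → Pre_get_majority neighbors → Spec_get_majority neighbors (get_majority neighbors)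

-- ===== LEMMAS AND PROOFS =====

-- A's branching accumulation step is exactly the Counter step.
theorem stepA_eq_modify (d : PySem.Dict Int Int) (x : Int) :
    (if d.contains x = false then d.insert x 1 else d.modify x 0 (· + 1)) = d.modify x 0 (· + 1) := by
  by_cases h : d.contains x
  · simp [h]
  · simp only [eq_false_of_ne_true h, PySem.Dict.modify]
    rw [PySem.Dict.getD_of_not_contains d 0 (eq_false_of_ne_true h)]
    norm_num

theorem foldA_eq_counter (n : List Int) :
    n.foldl (fun d x => if d.contains x = false then d.insert x 1 else d.modify x 0 (· + 1))
      (PySem.Dict.empty : PySem.Dict Int Int) = PySem.Dict.counter n := by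
  have : (fun (d : PySem.Dict Int Int) (x : Int) =>
      if d.contains x = false then d.insert x 1 else d.modify x 0 (· + 1))
      = fun d x => d.modify x 0 (· + 1) := funext fun d => funext fun x => stepA_eq_modify d x
  rw [this]; rfl

-- The step of Python max (PySem.List.max?), extracted for induction.
def pvStep {α : Type} (key : α → Int) (acc : Option α) (x : α) : Option α :=
  match acc with
  | none => some x
  | some m => if key m < key x then some x else some m

theorem max?_eq_foldl {α : Type} (xs : List α) (key : α → Int) :
    PySem.List.max? xs key = xs.foldl (pvStep key) none := rfl

theorem foldl_pvStep_of_max {α : Type} (key : α → Int) (l : List α) (a : α)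
    (h : ∀ y ∈ l, key y ≤ key a) : l.foldl (pvStep key) (some a) = some a := by
  induction l with
  | nil => rfl
  | cons x t ih =>
    have hx : ¬ key a < key x := not_lt.mpr (h x (List.mem_cons_self ..))
    rw [List.foldl_cons, show pvStep key (some a) x = some a from by simp [pvStep, hx]]
    exact ih fun y hy => h y (List.mem_cons_of_mem _ hy)

theorem foldl_pvStep_of_lt {α : Type} (key : α → Int) (M : Int) (l : List α) (a : α)
    (hub : ∀ y ∈ l, key y ≤ M) (ha : key a < M) (hex : ∃ y ∈ l, key y = M) :
    l.foldl (pvStep key) (some a) = l.find? (fun y => key y == M) := by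
  induction l generalizing a with
  | nil => exact absurd hex (by simp)
  | cons x t ih =>
    by_cases hx : key x = M
    · have hlt : key a < key x := hx ▸ ha
      rw [List.foldl_cons, show pvStep key (some a) x = some x from by simp [pvStep, hlt],
        List.find?_cons_of_pos (by simp [hx])]
      exact foldl_pvStep_of_max key t x fun y hy => hx ▸ hub y (List.mem_cons_of_mem _ hy)
    · have hxlt : key x < M := lt_of_le_of_ne (hub x (List.mem_cons_self ..)) hx
      have hex' : ∃ y ∈ t, key y = M := by
        obtain ⟨y, hy, hyM⟩ := hex
        rcases List.mem_cons.mp hy with rfl | hy'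
        · exact absurd hyM hx
        · exact ⟨y, hy', hyM⟩
      have hub' : ∀ y ∈ t, key y ≤ M := fun y hy => hub y (List.mem_cons_of_mem _ hy)
      rw [List.foldl_cons, List.find?_cons_of_neg (by simp [hx])]
      by_cases hax : key a < key x
      · rw [show pvStep key (some a) x = some x from by simp [pvStep, hax]]
        exact ih x hub' hxlt hex'
      · rw [show pvStep key (some a) x = some a from by simp [pvStep, hax]]
        exact ih a hub' ha hex'

-- Python max with key returns the FIRST element attaining the maximum key.
theorem max?_eq_find? {α : Type} (key : α → Int) (M : Int) (l : List α) (hne : l ≠ [])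
    (hub : ∀ y ∈ l, key y ≤ M) (hex : ∃ y ∈ l, key y = M) :
    PySem.List.max? l key = l.find? (fun y => key y == M) := by
  cases l with
  | nil => exact absurd rfl hne
  | cons x t =>
    rw [max?_eq_foldl, List.foldl_cons, show pvStep key none x = some x from rfl]
    by_cases hx : key x = M
    · rw [foldl_pvStep_of_max key t x fun y hy => hx ▸ hub y (List.mem_cons_of_mem _ hy),
        List.find?_cons_of_pos (by simp [hx])]
    · have hxlt : key x < M := lt_of_le_of_ne (hub x (List.mem_cons_self ..)) hx
      have hex' : ∃ y ∈ t, key y = M := by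
        obtain ⟨y, hy, hyM⟩ := hex
        rcases List.mem_cons.mp hy with rfl | hy'
        · exact absurd hyM hx
        · exact ⟨y, hy', hyM⟩
      rw [foldl_pvStep_of_lt key M t x (fun y hy => hub y (List.mem_cons_of_mem _ hy)) hxlt hex',
        List.find?_cons_of_neg (by simp [hx])]

-- find? commutes with dedup (first occurrences, in order).
theorem find?_foldl_add {α : Type} [BEq α] [LawfulBEq α] (p : α → Bool) (n : List α) (s : PySem.Set α) :
    (n.foldl PySem.Set.add s).find? p = (s.find? p).or (n.find? p) := by
  induction n generalizing s with
  | nil => cases h : s.find? p <;> simp [h]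
  | cons x t ih =>
    rw [List.foldl_cons, ih (PySem.Set.add s x)]
    by_cases hc : List.contains s x
    · have hmem : x ∈ s := List.contains_iff_mem.mp hc
      have hadd : PySem.Set.add s x = s := by simp [PySem.Set.add, hmem]
      rw [hadd]
      cases hfs : s.find? p with
      | some v => simp
      | none =>
        have hpx : p x = false := by simpa using List.find?_eq_none.mp hfs x hmem
        simp [hpx]
    · have hmem : x ∉ s := fun h => hc (List.contains_iff_mem.mpr h)
      have hadd : PySem.Set.add s x = s ++ [x] := by simp [PySem.Set.add, hmem]
      rw [hadd, List.find?_append]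
      cases hfs : s.find? p with
      | some v => simp
      | none => cases hpx : p x <;> simp [hpx]

theorem find?_dedup {α : Type} [BEq α] [LawfulBEq α] (p : α → Bool) (n : List α) :
    (PySem.List.dedup n).find? p = n.find? p := by
  have := find?_foldl_add p n (PySem.Set.empty : PySem.Set α)
  simpa [PySem.List.dedup, PySem.Set.ofList, PySem.Set.empty] using this

-- B's pair-accumulator scan is the Option scan of pvStep (second component stays key of first).
theorem foldB_eq_pvStep (key : Int → Int) (t : List Int) (a : Int) :
    ∃ b, t.foldl (fun acc x => if acc.2 < key x then (x, key x) else acc) (a, key a) = (b, key b)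
      ∧ t.foldl (pvStep key) (some a) = some b := by
  induction t generalizing a with
  | nil => exact ⟨a, rfl, rfl⟩
  | cons x t ih =>
    by_cases h : key a < key x
    · obtain ⟨b, h1, h2⟩ := ih x
      exact ⟨b, by simpa [h] using h1, by simpa [pvStep, h] using h2⟩
    · obtain ⟨b, h1, h2⟩ := ih a
      exact ⟨b, by simpa [h] using h1, by simpa [pvStep, h] using h2⟩

-- ===== VERDICT (by name: the statement is the Claim_ definition above) =====
theorem get_majority_spec : Claim_equal_get_majority := by
  intro n _ hpre
  unfold Spec_get_majority get_majority get_majority_alt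
  simp only [foldA_eq_counter]
  set c := PySem.Dict.counter n with hc
  have hitems : c.items = (PySem.List.dedup n).map (fun k => (k, (n.count k : Int))) := by
    rw [hc, PySem.Dict.items_counter]; rfl
  have hded_ne : PySem.List.dedup n ≠ [] := by
    cases n with
    | nil => exact absurd rfl hpre
    | cons x t =>
      intro h
      have hx : x ∈ PySem.List.dedup (x :: t) := (PySem.List.mem_dedup _ _).mpr (List.mem_cons_self ..)
      rw [h] at hx
      simp at hx
  -- the maximum key value m = key b, via Python max over n itself
  obtain ⟨b, hb⟩ : ∃ b, PySem.List.max? n (fun x => (n.count x : Int)) = some b := by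
    cases h : PySem.List.max? n (fun x => (n.count x : Int)) with
    | none => exact absurd ((PySem.List.max?_eq_none_iff _ _).mp h) hpre
    | some v => exact ⟨v, rfl⟩
  have hbmem : b ∈ n := PySem.List.max?_mem hb
  have hub : ∀ y ∈ n, (n.count y : Int) ≤ (n.count b : Int) := fun y hy => PySem.List.max?_isMax hb y hy
  set m : Int := (n.count b : Int) with hm
  -- A equals the first element of n whose count is m
  have hitems_ne : c.items ≠ [] := by
    rw [hitems]; simpa using hded_ne
  have hubI : ∀ p ∈ c.items, (fun p : Int × Int => p.2) p ≤ m := by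
    intro p hp
    rw [hitems] at hp
    obtain ⟨k, hk, rfl⟩ := List.mem_map.mp hp
    exact hub k ((PySem.List.mem_dedup _ _).mp hk)
  have hexI : ∃ p ∈ c.items, (fun p : Int × Int => p.2) p = m := by
    refine ⟨(b, m), ?_, rfl⟩
    rw [hitems]
    exact List.mem_map_of_mem ((PySem.List.mem_dedup _ _).mpr hbmem)
  have hA := max?_eq_find? (fun p : Int × Int => p.2) m c.items hitems_ne hubI hexI
  -- and max over n itself is also that first element
  have hN := max?_eq_find? (fun x => (n.count x : Int)) m n hpre hub ⟨b, hbmem, rfl⟩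
  have hfind : n.find? (fun y => ((n.count y : Int) == m)) = some b := hN ▸ hb
  rw [hA, hitems, List.find?_map, find?_dedup]
  have hcomp : ((fun p : Int × Int => p.2 == m) ∘ fun k => (k, (n.count k : Int)))
      = fun y => ((n.count y : Int) == m) := rfl
  rw [hcomp, hfind]
  -- B side
  cases n with
  | nil => exact absurd rfl hpre
  | cons b0 rest =>
    dsimp only
    rw [PySem.List.slice_from_one, List.tail_cons]
    obtain ⟨bB, h1, h2⟩ := foldB_eq_pvStep (fun x => ((b0 :: rest).count x : Int)) rest b0
    have hmax : PySem.List.max? (b0 :: rest) (fun x => ((b0 :: rest).count x : Int)) = some bB := by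
      rw [max?_eq_foldl, List.foldl_cons]
      exact h2
    rw [hb] at hmax
    rw [h1]
    exact Option.some.inj hmax
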